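-- pv_equiv track=rewrite | github.com/sskkilm/PS | 프로그래머스/lv1/92334. 신고 결과 받기/신고 결과 받기.py | solution
-- ===== SOURCE A (Python) =====
-- from collections import defaultdict
--
-- def solution(id_list, report, k):
--     answer = []
--
--     # 피신고자 -> 신고자
--     my_dict = defaultdict(set)
--     # 결과
--     result_dict = dict.fromkeys(id_list, 0)
--
--     for r in report:
--         a, b = r.split()
--         my_dict[b].add(a)
--
--     for key in my_dict.keys():
--         if len(my_dict[key]) >= k:
--             for v in list(my_dict[key]):
--                 result_dict[v] += 1
--
--     answer = list(result_dict.values())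
--
--     return answer
-- ===== SOURCE B (Python) =====
-- def solution(id_list, report, k):
--     # per-user pull: for each distinct id, count the distinct reported users it gets credit for
--     pairs = {tuple(r.split()) for r in report}
--     targets = {b for a, b in pairs}
--     bad = {b for b in targets if sum(1 for a, c in pairs if c == b) >= k}
--     return [len({b for a, b in pairs if a == i and b in bad})
--             for i in dict.fromkeys(id_list)]
-- ===== Notes on version B (the rewrite author's own statement) =====
-- stated objective: alternative
-- what changed: Replaces A's push-style accumulation (group reporters into per-target sets, then loop over each qualifying target's reporter set incrementing a mutable result dict) by a pull-style computation: a set of qualifying reported users is computed once and each id's answer is produced directly as the size of the set of its distinct qualifying targets, with no mutable result dict.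
import Mathlib
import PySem

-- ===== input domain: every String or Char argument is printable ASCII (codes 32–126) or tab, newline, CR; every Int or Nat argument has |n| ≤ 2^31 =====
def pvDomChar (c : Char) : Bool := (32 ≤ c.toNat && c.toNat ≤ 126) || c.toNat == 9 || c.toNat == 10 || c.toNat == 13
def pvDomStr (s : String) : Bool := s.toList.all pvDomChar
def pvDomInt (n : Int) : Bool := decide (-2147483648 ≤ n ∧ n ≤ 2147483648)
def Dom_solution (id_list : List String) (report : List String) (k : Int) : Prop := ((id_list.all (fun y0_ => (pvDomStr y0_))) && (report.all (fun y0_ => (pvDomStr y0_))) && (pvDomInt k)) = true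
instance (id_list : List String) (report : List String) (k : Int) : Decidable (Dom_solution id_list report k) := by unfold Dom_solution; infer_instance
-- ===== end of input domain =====

-- B replaces A's push-style credit accumulation (per-target reporter sets, then increments into a
-- mutable result dict) by a pull-style computation: the set of qualifying reported users is built
-- once and each id's answer is the size of the set of its distinct qualifying targets
-- (objective: alternative).

-- ===== PORT A =====
def solution (id_list : List String) (report : List String) (k : Int) : List Int :=
  -- my_dict = defaultdict(set); for r in report: a, b = r.split(); my_dict[b].add(a)
  let my_dict : PySem.Dict String (PySem.Set String) :=
    report.foldl (fun d r =>
      match PySem.Str.split₀ r with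
      | [a, b] => d.modify b PySem.Set.empty (fun s => s.add a)
      | _ => d) PySem.Dict.empty   -- a line with ≠ 2 tokens raises ValueError in Python (outside Pre_)
  -- result_dict = dict.fromkeys(id_list, 0)
  let result0 : PySem.Dict String Int :=
    id_list.foldl (fun d i => d.insert i 0) PySem.Dict.empty
  let result :=
    my_dict.keys.foldl (fun res key =>
      if k ≤ PySem.Set.len (my_dict.getD key PySem.Set.empty) then
        (my_dict.getD key PySem.Set.empty).foldl (fun res v => res.modify v 0 (· + 1)) res
      else res) result0   -- result_dict[v] += 1 raises KeyError when v is absent (outside Pre_)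
  result.values

-- ===== PORT B =====
def solution_alt (id_list : List String) (report : List String) (k : Int) : List Int :=
  -- pairs = {tuple(r.split()) for r in report}
  let pairs : PySem.Set (String × String) :=
    report.foldl (fun s r =>
      let ts := PySem.Str.split₀ r
      if ts.length = 2 then s.add (ts.getD 0 "", ts.getD 1 "")
      else s) PySem.Set.empty   -- a line with ≠ 2 tokens raises in Python (outside Pre_)
  -- targets = {b for a, b in pairs}
  let targets : PySem.Set String :=
    PySem.Set.ofList ((pairs : List (String × String)).map (·.2))
  -- bad = {b for b in targets if sum(1 for a, c in pairs if c == b) >= k}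
  let bad : PySem.Set String :=
    PySem.Set.ofList ((targets : List String).filter
      (fun b => decide (k ≤ ((pairs : List (String × String)).countP (fun p => p.2 == b) : Int))))
  -- [len({b for a, b in pairs if a == i and b in bad}) for i in dict.fromkeys(id_list)]
  (PySem.List.dedup id_list).map (fun i =>
    ((PySem.Set.ofList ((pairs : List (String × String)).filterMap
        (fun p => if p.1 = i ∧ p.2 ∈ bad then some p.2 else none)) : List String).length : Int))

-- ===== PRECONDITION & SPEC =====
-- the (reporter, reported) pairs parsed from the report lines that split into exactly two tokens
def pvPairs (report : List String) : List (String × String) :=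
  report.filterMap (fun r =>
    let ts := PySem.Str.split₀ r
    if ts.length = 2 then some (ts.getD 0 "", ts.getD 1 "") else none)

-- the distinct reporters of user b
def pvReporters (report : List String) (b : String) : PySem.Set String :=
  PySem.Set.ofList ((pvPairs report).filterMap (fun q => if q.2 = b then some q.1 else none))

-- Pre_ = exactly the inputs where A returns: every report line splits into exactly two tokens
-- (else ValueError), and every reporter whose reported user gathered ≥ k distinct reporters is
-- itself in id_list (else KeyError on result_dict[v] += 1).
def Pre_solution (id_list : List String) (report : List String) (k : Int) : Prop :=
  (∀ r ∈ report, (PySem.Str.split₀ r).length = 2) ∧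
  (∀ p ∈ pvPairs report, k ≤ ((pvReporters report p.2 : List String).length : Int) → p.1 ∈ id_list)
instance (id_list : List String) (report : List String) (k : Int) : Decidable (Pre_solution id_list report k) := by unfold Pre_solution; infer_instance

def pvWitness_solution : List String × List String × Int :=
  (["muzi", "frodo", "apeach", "neo"],
   ["muzi frodo", "apeach frodo", "frodo neo", "muzi neo", "apeach muzi"], 2)

def Spec_solution (id_list : List String) (report : List String) (k : Int) (out : List Int) : Prop := out = solution_alt id_list report k
instance (id_list : List String) (report : List String) (k : Int) (out : List Int) : Decidable (Spec_solution id_list report k out) := by unfold Spec_solution; infer_instance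

-- ===== CLAIM (what is proved, stated in full; the proofs are below) =====
def Claim_equal_solution : Prop := ∀ (id_list : List String) (report : List String) (k : Int), Dom_solution id_list report k → Pre_solution id_list report k → Spec_solution id_list report k (solution id_list report k)

-- ===== LEMMAS AND PROOFS =====

-- distinct reporter list of b, over an arbitrary pair list
def pvS (L : List (String × String)) (b : String) : PySem.Set String :=
  PySem.Set.ofList (L.filterMap (fun q => if q.2 = b then some q.1 else none))

theorem pvReporters_eq_pvS (report : List String) (b : String) :
    pvReporters report b = pvS (pvPairs report) b := rfl

theorem pv_mem_S (L : List (String × String)) (b v : String) :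
    v ∈ pvS L b ↔ (v, b) ∈ L := by
  unfold pvS
  rw [PySem.Set.mem_ofList, List.mem_filterMap]
  constructor
  · rintro ⟨q, hq, hf⟩
    by_cases h2 : q.2 = b
    · simp [h2] at hf
      have : q = (v, b) := by cases q; simp_all
      exact this ▸ hq
    · simp [h2] at hf
  · intro h; exact ⟨(v, b), h, by simp⟩

theorem pv_nodup_S (L : List (String × String)) (b : String) : (pvS L b : List String).Nodup :=
  PySem.Set.nodup_ofList _

theorem pv_count_nodup {α : Type} [DecidableEq α] (s : List α) (h : s.Nodup) (v : α) :
    s.count v = if v ∈ s then 1 else 0 := by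
  split_ifs with hm
  · exact List.count_eq_one_of_mem h hm
  · exact List.count_eq_zero_of_not_mem hm

-- the two port bodies, specialised so that `rw` matches them syntactically
theorem pv_fold_A (report : List String) :
    (∀ r ∈ report, (PySem.Str.split₀ r).length = 2) →
    ∀ (init : PySem.Dict String (PySem.Set String)),
    report.foldl (fun d r =>
      match PySem.Str.split₀ r with
      | [a, b] => d.modify b PySem.Set.empty (fun s => s.add a)
      | _ => d) init
      = (pvPairs report).foldl (fun d p => d.modify p.2 PySem.Set.empty (fun s => s.add p.1)) init := by
  induction report with
  | nil => intro _ init; rfl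
  | cons r rest ih =>
    intro h init
    have hr := h r (by simp)
    obtain ⟨a, b, hab⟩ : ∃ a b, PySem.Str.split₀ r = [a, b] := by
      match hl : PySem.Str.split₀ r with
      | [a, b] => exact ⟨a, b, rfl⟩
      | [] => rw [hl] at hr; simp at hr
      | [x] => rw [hl] at hr; simp at hr
      | (x :: y :: z :: t) => rw [hl] at hr; simp at hr
    simp only [pvPairs, List.foldl_cons, List.filterMap_cons, hab]
    simp only [List.length_cons, List.length_nil, List.getD]
    exact ih (fun r hrm => h r (by simp [hrm])) _

theorem pv_fold_B (report : List String) :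
    (∀ r ∈ report, (PySem.Str.split₀ r).length = 2) →
    ∀ (init : PySem.Set (String × String)),
    report.foldl (fun s r =>
      let ts := PySem.Str.split₀ r
      if ts.length = 2 then s.add (ts.getD 0 "", ts.getD 1 "")
      else s) init
      = (pvPairs report).foldl (fun s p => s.add p) init := by
  induction report with
  | nil => intro _ init; rfl
  | cons r rest ih =>
    intro h init
    have hr := h r (by simp)
    obtain ⟨a, b, hab⟩ : ∃ a b, PySem.Str.split₀ r = [a, b] := by
      match hl : PySem.Str.split₀ r with
      | [a, b] => exact ⟨a, b, rfl⟩
      | [] => rw [hl] at hr; simp at hr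
      | [x] => rw [hl] at hr; simp at hr
      | (x :: y :: z :: t) => rw [hl] at hr; simp at hr
    simp only [pvPairs, List.foldl_cons, List.filterMap_cons, hab]
    simp only [List.length_cons, List.length_nil, List.getD]
    exact ih (fun r hrm => h r (by simp [hrm])) _

-- getD of A's grouping dict
theorem pv_getD_group :
    ∀ (L : List (String × String)) (d : PySem.Dict String (PySem.Set String)) (b : String),
    (L.foldl (fun d p => d.modify p.2 PySem.Set.empty (fun s => s.add p.1)) d).getD b PySem.Set.empty
      = PySem.Set.update (d.getD b PySem.Set.empty)
          (L.filterMap (fun q => if q.2 = b then some q.1 else none)) := by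
  intro L
  induction L with
  | nil => intro d b; rfl
  | cons p rest ih =>
    intro d b
    simp only [List.foldl_cons, List.filterMap_cons, ih]
    by_cases hb : p.2 = b
    · simp [hb, PySem.Set.update]
    · simp [hb, PySem.Dict.getD_modify, Ne.symm hb]

-- flatten A's guarded nested fold (Prop condition, as in the port)
theorem pv_foldl_if_inner {α β γ : Type} (c : α → Prop) [DecidablePred c] (g : α → List γ)
    (step : β → γ → β) :
    ∀ (K : List α) (init : β),
    K.foldl (fun res b => if c b then (g b).foldl step res else res) init
      = (K.flatMap (fun b => if c b then g b else [])).foldl step init := by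
  intro K
  induction K with
  | nil => intro init; rfl
  | cons b rest ih =>
    intro init
    simp only [List.foldl_cons, List.flatMap_cons, List.foldl_append, ih]
    by_cases hc : c b <;> simp [hc]

-- fromkeys(id_list, 0): every lookup with default 0 is 0
theorem pv_getD_zero (xs : List String) :
    ∀ (d : PySem.Dict String Int), (∀ v, d.getD v 0 = 0) → ∀ v,
    (xs.foldl (fun d i => d.insert i 0) d).getD v 0 = 0 := by
  induction xs with
  | nil => intro d h v; exact h v
  | cons i rest ih =>
    intro d h v
    refine ih _ (fun w => ?_) v
    rw [PySem.Dict.getD_insert]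
    split_ifs <;> simp [h]

theorem pv_add_mem {x : String} {s : PySem.Set String} (h : x ∈ s) : s.add x = s := by
  simp [PySem.Set.add, h]

-- update by a list of existing members is the identity
theorem pv_update_mem (s : PySem.Set String) :
    ∀ (xs : List String), (∀ x ∈ xs, x ∈ s) → PySem.Set.update s xs = s := by
  intro xs
  induction xs generalizing s with
  | nil => intro _; rfl
  | cons x rest ih =>
    intro h
    show PySem.Set.update (s.add x) rest = s
    rw [pv_add_mem (h x (by simp))]
    exact ih s (fun y hy => h y (by simp [hy]))

-- A's credit multiset count: for each qualifying reported user b with v among its reporters, one credit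
theorem pv_countA (L : List (String × String)) (k : Int) (v : String) :
    ∀ (K : List String),
    (K.flatMap (fun b =>
        if k ≤ ((pvS L b : List String).length : Int) then (pvS L b : List String) else [])).count v
      = (K.filter (fun b =>
          decide (k ≤ ((pvS L b : List String).length : Int)) && decide (v ∈ pvS L b))).length := by
  intro K
  induction K with
  | nil => rfl
  | cons b rest ih =>
    simp only [List.flatMap_cons, List.count_append, List.filter_cons, ih]
    by_cases hq : k ≤ ((pvS L b : List String).length : Int)
    · by_cases hv : v ∈ pvS L b
      · simp [hq, hv, pv_count_nodup _ (pv_nodup_S L b) v]; omega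
      · simp [hq, hv, pv_count_nodup _ (pv_nodup_S L b) v]
    · simp [hq]

-- count of b among the seconds of the distinct pairs = number of distinct reporters of b
theorem pv_count_snd (L : List (String × String)) (b : String) :
    ((PySem.Set.ofList L).map (·.2)).count b = (pvS L b : List String).length := by
  have h1 : ((PySem.Set.ofList L).map (·.2)).count b
      = (((PySem.Set.ofList L).filter (fun p => p.2 == b)).map (·.1)).length := by
    rw [List.count_eq_countP, List.countP_map, List.length_map,
        List.countP_eq_length_filter]
    rfl
  rw [h1]
  have hP : ((PySem.Set.ofList L) : List (String × String)).Nodup := PySem.Set.nodup_ofList _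
  have hnd1 : (((PySem.Set.ofList L).filter (fun p => p.2 == b)).map (·.1)).Nodup := by
    refine (hP.filter _).map_on ?_
    intro x hx y hy hxy
    have hx2 : x.2 = b := by simpa using (List.of_mem_filter hx)
    have hy2 : y.2 = b := by simpa using (List.of_mem_filter hy)
    cases x; cases y; simp_all
  have hperm : (((PySem.Set.ofList L).filter (fun p => p.2 == b)).map (·.1)).Perm (pvS L b) := by
    rw [List.perm_ext_iff_of_nodup hnd1 (pv_nodup_S L b)]
    intro a
    rw [pv_mem_S, List.mem_map]
    constructor
    · rintro ⟨p, hp, hp1⟩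
      have hp2 : p.2 = b := by simpa using (List.of_mem_filter hp)
      have hpm : p ∈ PySem.Set.ofList L := List.mem_of_mem_filter hp
      rw [PySem.Set.mem_ofList] at hpm
      have : p = (a, b) := by cases p; simp_all
      exact this ▸ hpm
    · intro h
      refine ⟨(a, b), ?_, rfl⟩
      rw [List.mem_filter, PySem.Set.mem_ofList]
      exact ⟨h, by simp⟩
  exact hperm.length_eq

-- B's flat count over distinct pairs equals A's grouped count over distinct reported users
theorem pv_count_eq (L : List (String × String)) (k : Int) (v : String) :
    ((PySem.Set.ofList L).filter (fun p =>
        decide (k ≤ ((pvS L p.2 : List String).length : Int)) && decide (p.1 = v))).length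
      = ((PySem.Set.ofList (L.map (·.2))).filter (fun b =>
          decide (k ≤ ((pvS L b : List String).length : Int)) && decide (v ∈ pvS L b))).length := by
  have hP : ((PySem.Set.ofList L) : List (String × String)).Nodup := PySem.Set.nodup_ofList _
  have hK : ((PySem.Set.ofList (L.map (·.2))) : List String).Nodup := PySem.Set.nodup_ofList _
  have hnd1 : (((PySem.Set.ofList L).filter (fun p =>
      decide (k ≤ ((pvS L p.2 : List String).length : Int)) && decide (p.1 = v))).map (·.2)).Nodup := by
    refine (hP.filter _).map_on ?_
    intro x hx y hy hxy
    have hx1 : x.1 = v := by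
      have := List.of_mem_filter hx; simp at this; exact this.2
    have hy1 : y.1 = v := by
      have := List.of_mem_filter hy; simp at this; exact this.2
    cases x; cases y; simp_all
  have hperm : (((PySem.Set.ofList L).filter (fun p =>
      decide (k ≤ ((pvS L p.2 : List String).length : Int)) && decide (p.1 = v))).map (·.2)).Perm
      ((PySem.Set.ofList (L.map (·.2))).filter (fun b =>
        decide (k ≤ ((pvS L b : List String).length : Int)) && decide (v ∈ pvS L b))) := by
    rw [List.perm_ext_iff_of_nodup hnd1 (hK.filter _)]
    intro b
    rw [List.mem_map]
    constructor
    · rintro ⟨p, hp, hp2⟩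
      have hc := List.of_mem_filter hp
      simp at hc
      have hpm : p ∈ PySem.Set.ofList L := List.mem_of_mem_filter hp
      rw [PySem.Set.mem_ofList] at hpm
      have hpe : p = (v, b) := by cases p; simp_all
      subst hpe
      rw [List.mem_filter, PySem.Set.mem_ofList]
      refine ⟨List.mem_map_of_mem hpm, ?_⟩
      simp only [hc.1]
      simpa [pv_mem_S] using hpm
    · intro hb
      rw [List.mem_filter] at hb
      obtain ⟨hbm, hc⟩ := hb
      simp at hc
      have hvb : (v, b) ∈ L := (pv_mem_S L b v).mp hc.2
      refine ⟨(v, b), ?_, rfl⟩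
      rw [List.mem_filter, PySem.Set.mem_ofList]
      exact ⟨hvb, by simp [hc.1]⟩
  have := hperm.length_eq
  simpa using this

-- a filterMap with an 'if … then some (f p) else none' body is a filter followed by a map
theorem pv_filterMap_if {α β : Type} (c : α → Prop) [DecidablePred c] (f : α → β) :
    ∀ (xs : List α),
    xs.filterMap (fun x => if c x then some (f x) else none)
      = (xs.filter (fun x => decide (c x))).map f := by
  intro xs
  induction xs with
  | nil => rfl
  | cons x rest ih =>
    by_cases hc : c x <;> simp [hc, ih]

-- length of a set built from an already-duplicate-free list
theorem pv_len_ofList_nodup {α : Type} [BEq α] [LawfulBEq α] (xs : List α) (h : xs.Nodup) :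
    (PySem.Set.ofList xs : List α).length = xs.length :=
  congrArg List.length (PySem.Set.ofList_eq_self_of_nodup xs h)

-- A's final values list, computed: one count per distinct id, in first-occurrence order
theorem pv_A_values (id_list : List String) (CL : List String)
    (h : ∀ x ∈ CL, x ∈ id_list) :
    (CL.foldl (fun d x => d.modify x 0 (· + 1))
      (id_list.foldl (fun d i => d.insert i 0) (PySem.Dict.empty : PySem.Dict String Int))).values
      = (PySem.Set.ofList id_list).map (fun v => (CL.count v : Int)) := by
  have hr0keys : (id_list.foldl (fun d i => d.insert i 0)
      (PySem.Dict.empty : PySem.Dict String Int)).keys = PySem.Set.ofList id_list := by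
    have := PySem.Dict.keys_foldl_insert id_list (fun _ _ => (0 : Int)) PySem.Dict.empty
    simpa [PySem.Dict.keys_empty, PySem.Set.update_nil_left] using this
  have hr0nodup : (id_list.foldl (fun d i => d.insert i 0)
      (PySem.Dict.empty : PySem.Dict String Int)).keys.Nodup :=
    PySem.Dict.nodup_keys_foldl_insert _ _ _ PySem.Dict.nodup_keys_empty
  have hkeys : (CL.foldl (fun d x => d.modify x 0 (· + 1))
      (id_list.foldl (fun d i => d.insert i 0)
        (PySem.Dict.empty : PySem.Dict String Int))).keys = PySem.Set.ofList id_list := by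
    have := PySem.Dict.keys_foldl_modify CL (0 : Int) (fun _ _ => (· + 1))
      (id_list.foldl (fun d i => d.insert i 0) (PySem.Dict.empty : PySem.Dict String Int))
    simp only [hr0keys] at this
    rw [this, pv_update_mem]
    intro x hx
    rw [PySem.Set.mem_ofList]
    exact h x hx
  have hnodup : (CL.foldl (fun d x => d.modify x 0 (· + 1))
      (id_list.foldl (fun d i => d.insert i 0)
        (PySem.Dict.empty : PySem.Dict String Int))).keys.Nodup :=
    PySem.Dict.nodup_keys_foldl_modify_key CL (fun x => x) 0 (fun _ _ => (· + 1)) _ hr0nodup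
  rw [PySem.Dict.values_eq_map_keys _ hnodup 0, hkeys]
  refine List.map_congr_left ?_
  intro v _
  rw [PySem.Dict.getD_foldl_modify_add_one,
      pv_getD_zero id_list _ (fun w => PySem.Dict.getD_empty w 0) v]
  simp

-- the core equivalence, over the parsed pair list
theorem pv_main (id_list : List String) (k : Int) (L : List (String × String))
    (hmem : ∀ p ∈ L, k ≤ ((pvS L p.2 : List String).length : Int) → p.1 ∈ id_list) :
    (let md := L.foldl (fun d p => d.modify p.2 PySem.Set.empty (fun s => s.add p.1))
        PySem.Dict.empty
     (md.keys.foldl (fun res key =>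
        if k ≤ PySem.Set.len (md.getD key PySem.Set.empty) then
          (md.getD key PySem.Set.empty).foldl (fun res v => res.modify v 0 (· + 1)) res
        else res)
       (id_list.foldl (fun d i => d.insert i 0)
         (PySem.Dict.empty : PySem.Dict String Int))).values)
    = (let P := PySem.Set.ofList L
       let targets : PySem.Set String := PySem.Set.ofList ((P : List (String × String)).map (·.2))
       let bad : PySem.Set String :=
         PySem.Set.ofList ((targets : List String).filter
           (fun b => decide (k ≤ ((P : List (String × String)).countP (fun p => p.2 == b) : Int))))
       (PySem.List.dedup id_list).map (fun i =>
         ((PySem.Set.ofList ((P : List (String × String)).filterMap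
             (fun p => if p.1 = i ∧ p.2 ∈ bad then some p.2 else none)) : List String).length : Int))) := by
  simp only []
  -- A's grouping dict: lookups and keys
  have hSb : ∀ b, (L.foldl (fun d p => d.modify p.2 PySem.Set.empty (fun s => s.add p.1))
      PySem.Dict.empty).getD b PySem.Set.empty = pvS L b := by
    intro b
    rw [pv_getD_group, PySem.Dict.getD_empty]
    show PySem.Set.update [] _ = _
    rw [PySem.Set.update_nil_left]
    rfl
  have hkeys : (L.foldl (fun d p => d.modify p.2 PySem.Set.empty (fun s => s.add p.1))
      PySem.Dict.empty).keys = PySem.Set.ofList (L.map (·.2)) := by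
    have := PySem.Dict.keys_foldl_modify_key L (fun p => p.2) PySem.Set.empty
      (fun _ p => (fun s => s.add p.1)) PySem.Dict.empty
    simpa [PySem.Dict.keys_empty, PySem.Set.update_nil_left] using this
  simp only [hSb, hkeys, PySem.Set.len_eq]
  rw [pv_foldl_if_inner (fun b => k ≤ ((pvS L b : List String).length : Int))
        (fun b => (pvS L b : List String)) _ _ _]
  -- A's output, computed
  have hCL : ∀ x ∈ ((PySem.Set.ofList (L.map (·.2)) : List String).flatMap (fun b =>
      if k ≤ ((pvS L b : List String).length : Int) then (pvS L b : List String) else [])),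
      x ∈ id_list := by
    intro x hx
    rw [List.mem_flatMap] at hx
    obtain ⟨b, hbK, hxb⟩ := hx
    by_cases hq : k ≤ ((pvS L b : List String).length : Int)
    · rw [if_pos hq] at hxb
      exact hmem (x, b) ((pv_mem_S L b x).mp hxb) hq
    · rw [if_neg hq] at hxb
      simp at hxb
  rw [pv_A_values id_list _ hCL, PySem.List.dedup_eq_ofList]
  refine List.map_congr_left ?_
  intro v _
  -- membership in bad
  have hbad : ∀ b, (b ∈ PySem.Set.ofList ((PySem.Set.ofList ((PySem.Set.ofList L :
        List (String × String)).map (·.2)) : List String).filter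
        (fun b => decide (k ≤ ((PySem.Set.ofList L : List (String × String)).countP
          (fun p => p.2 == b) : Int))))) ↔
      (b ∈ L.map (·.2) ∧ k ≤ ((pvS L b : List String).length : Int)) := by
    intro b
    rw [PySem.Set.mem_ofList, List.mem_filter, PySem.Set.mem_ofList]
    have hcnt : ((PySem.Set.ofList L : List (String × String)).countP (fun p => p.2 == b))
        = (pvS L b : List String).length := by
      rw [← pv_count_snd L b, List.count_eq_countP, List.countP_map]
      rfl
    rw [hcnt]
    constructor
    · rintro ⟨hm, hc⟩
      rw [List.mem_map] at hm ⊢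
      obtain ⟨p, hp, hpb⟩ := hm
      rw [PySem.Set.mem_ofList] at hp
      exact ⟨⟨p, hp, hpb⟩, by simpa using hc⟩
    · rintro ⟨hm, hc⟩
      rw [List.mem_map] at hm ⊢
      obtain ⟨p, hp, hpb⟩ := hm
      exact ⟨⟨p, (PySem.Set.mem_ofList _ _).mpr hp, hpb⟩, by simpa using hc⟩
  -- B's set for v, as a filter over the distinct pairs
  rw [pv_filterMap_if]
  have hfc : ∀ p ∈ (PySem.Set.ofList L : List (String × String)),
      (decide (p.1 = v ∧ p.2 ∈ PySem.Set.ofList ((PySem.Set.ofList ((PySem.Set.ofList L :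
          List (String × String)).map (·.2)) : List String).filter
          (fun b => decide (k ≤ ((PySem.Set.ofList L : List (String × String)).countP
            (fun p => p.2 == b) : Int))))))
        = (decide (k ≤ ((pvS L p.2 : List String).length : Int)) && decide (p.1 = v)) := by
    intro p hp
    rw [PySem.Set.mem_ofList] at hp
    have hpm : p.2 ∈ L.map (·.2) := List.mem_map_of_mem hp
    have hMi : (p.2 ∈ PySem.Set.ofList ((PySem.Set.ofList ((PySem.Set.ofList L :
          List (String × String)).map (·.2)) : List String).filter
          (fun b => decide (k ≤ ((PySem.Set.ofList L : List (String × String)).countP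
            (fun p => p.2 == b) : Int)))))
        ↔ k ≤ ((pvS L p.2 : List String).length : Int) :=
      ⟨fun hc => ((hbad p.2).mp hc).2, fun h => (hbad p.2).mpr ⟨hpm, h⟩⟩
    by_cases h2 : k ≤ ((pvS L p.2 : List String).length : Int)
    · by_cases h1 : p.1 = v
      · rw [decide_eq_true ⟨h1, hMi.mpr h2⟩, decide_eq_true h2, decide_eq_true h1]; rfl
      · rw [decide_eq_false (fun hC => h1 hC.1), decide_eq_false h1, Bool.and_false]
    · rw [decide_eq_false (fun hC => h2 (hMi.mp hC.2)), decide_eq_false h2, Bool.false_and]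
  rw [List.filter_congr hfc]
  -- the filtered seconds are distinct, so the set comprehension keeps them all
  have hP : ((PySem.Set.ofList L) : List (String × String)).Nodup := PySem.Set.nodup_ofList _
  have hnd : (((PySem.Set.ofList L).filter (fun p =>
      decide (k ≤ ((pvS L p.2 : List String).length : Int)) && decide (p.1 = v))).map (·.2)).Nodup := by
    refine (hP.filter _).map_on ?_
    intro x hx y hy hxy
    have hx1 : x.1 = v := by
      have := List.of_mem_filter hx; simp at this; exact this.2
    have hy1 : y.1 = v := by
      have := List.of_mem_filter hy; simp at this; exact this.2
    cases x; cases y; simp_all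
  rw [pv_len_ofList_nodup _ hnd, List.length_map]
  rw [pv_countA L k v, ← pv_count_eq L k v]

-- ===== VERDICT (by name: the statement is the Claim_ definition above) =====
theorem solution_spec : Claim_equal_solution := by
  intro id_list report k _hdom hpre
  obtain ⟨h2, hmem⟩ := hpre
  unfold Spec_solution solution solution_alt
  simp only []
  rw [pv_fold_A report h2, pv_fold_B report h2]
  rw [show (pvPairs report).foldl (fun s p => s.add p) PySem.Set.empty
        = PySem.Set.ofList (pvPairs report) from rfl]
  exact pv_main id_list k (pvPairs report)
    (fun p hp hq => hmem p hp (by rwa [pvReporters_eq_pvS]))
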